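-- pv_equiv track=rewrite | github.com/bmajoros/EnhancerHMM | run-genome-wide.py | getForeground
-- ===== SOURCE A (Python) =====
-- from builtins import (bytes, dict, int, list, object, range, str, ascii,
--    chr, hex, input, next, oct, open, pow, round, super, filter, map, zip)
--
-- def getSections(path):
--     sections=[]
--     L=len(path)
--     elem=[]
--     for i in range(L):
--         state=path[i]
--         eLen=len(elem)
--         if(eLen==0 or elem[eLen-1]==state): elem.append(state)
--         else:
--             sections.append(elem)
--             elem=[state]
--     if(len(elem)>0): sections.append(elem)
--     return sections
--
-- def getForeground(path):
--     sections=getSections(path)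
--     begin=None
--     end=None
--     pos=0
--     for section in sections:
--         L=len(section)
--         type=section[0]
--         if(type>1 and type<5 or type>6 and type<10 or type>11 and type<15):
--             if(begin is None): begin=pos
--         elif(type==5 or type==10 or type==15): end=pos
--         pos+=L
--     if(end is None): end=pos
--     return (begin,end)
-- ===== SOURCE B (Python) =====
-- def getForeground(path):
--     begin = None
--     end = None
--     i = 0
--     prev = None
--     for t in path:
--         if prev is None or t != prev:
--             if t > 1 and t < 5 or t > 6 and t < 10 or t > 11 and t < 15:
--                 if begin is None:
--                     begin = i
--             elif t == 5 or t == 10 or t == 15: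
--                 end = i
--         prev = t
--         i += 1
--     if end is None:
--         end = len(path)
--     return (begin, end)
-- ===== Notes on version B (the rewrite author's own statement) =====
-- stated objective: simpler
-- what changed: B detects run starts in one direct pass over path, tracking the previous element, instead of first materialising the list of equal-value sections and then folding over it with a position counter.
import Mathlib
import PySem

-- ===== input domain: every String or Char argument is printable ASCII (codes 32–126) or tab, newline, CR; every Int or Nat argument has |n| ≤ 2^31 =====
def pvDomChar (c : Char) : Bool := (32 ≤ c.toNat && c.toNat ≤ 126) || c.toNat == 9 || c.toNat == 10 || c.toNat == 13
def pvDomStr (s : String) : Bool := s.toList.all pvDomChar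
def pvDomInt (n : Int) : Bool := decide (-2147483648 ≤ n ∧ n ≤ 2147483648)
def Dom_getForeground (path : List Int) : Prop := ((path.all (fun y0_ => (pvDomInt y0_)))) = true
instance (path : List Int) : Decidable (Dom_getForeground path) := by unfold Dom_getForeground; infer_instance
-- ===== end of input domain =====

-- B detects run starts in one direct pass over path (tracking the previous element) instead of
-- materialising the section list first and folding over it: a simpler decomposition, same O(n) cost.

-- ===== PORT A =====
def gfStep (st : Option Int × Option Int × Int) (section_ : List Int) : Option Int × Option Int × Int :=
  let (begin_, end_, pos) := st
  let L : Int := (section_.length : Int)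
  let type := section_.headD 0
  if (1 < type ∧ type < 5) ∨ (6 < type ∧ type < 10) ∨ (11 < type ∧ type < 15) then
    ((if begin_ = none then some pos else begin_), end_, pos + L)
  else if type = 5 ∨ type = 10 ∨ type = 15 then
    (begin_, some pos, pos + L)
  else (begin_, end_, pos + L)

def gsStep (st : List (List Int) × List Int) (state : Int) : List (List Int) × List Int :=
  let (sections, elem) := st
  if elem.length = 0 ∨ elem.getLast? = some state then (sections, elem ++ [state])
  else (sections ++ [elem], [state])

def getSections (path : List Int) : List (List Int) :=
  let (sections, elem) := path.foldl gsStep ([], [])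
  if elem.length > 0 then sections ++ [elem] else sections

def getForeground (path : List Int) : Option Int × Int :=
  let sections := getSections path
  let (begin_, end_, pos) := sections.foldl gfStep (none, none, 0)
  (begin_, end_.getD pos)

-- ===== PORT B =====
def gfAltStep (st : Option Int × Option Int × Int × Option Int) (t : Int) :
    Option Int × Option Int × Int × Option Int :=
  let (begin_, end_, i, prev) := st
  if prev = none ∨ prev ≠ some t then
    if (1 < t ∧ t < 5) ∨ (6 < t ∧ t < 10) ∨ (11 < t ∧ t < 15) then
      ((if begin_ = none then some i else begin_), end_, i + 1, some t)
    else if t = 5 ∨ t = 10 ∨ t = 15 then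
      (begin_, some i, i + 1, some t)
    else (begin_, end_, i + 1, some t)
  else (begin_, end_, i + 1, some t)

def getForeground_alt (path : List Int) : Option Int × Int :=
  let (begin_, end_, _, _) := path.foldl gfAltStep (none, none, 0, none)
  (begin_, end_.getD (path.length : Int))

-- ===== PRECONDITION & SPEC =====
def Spec_getForeground (path : List Int) (out : Option Int × Int) : Prop := out = getForeground_alt path
instance (path : List Int) (out : Option Int × Int) : Decidable (Spec_getForeground path out) := by unfold Spec_getForeground; infer_instance

-- ===== CLAIM (what is proved, stated in full; the proofs are below) =====
def Claim_equal_getForeground : Prop := ∀ (path : List Int), Dom_getForeground path → Spec_getForeground path (getForeground path)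

-- ===== LEMMAS AND PROOFS =====

def runs (l : List Int) : List (List Int) :=
  match l with
  | [] => []
  | a :: l' => (a :: l'.takeWhile (· == a)) :: runs (l'.dropWhile (· == a))
termination_by l.length
decreasing_by simpa using Nat.lt_succ_of_le (List.length_dropWhile_le _ _)

def M (l : List Int) (st : Option Int × Option Int × Int) : Option Int × Option Int × Int :=
  match l with
  | [] => st
  | a :: l' => M (l'.dropWhile (· == a)) (gfStep st (a :: l'.takeWhile (· == a)))
termination_by l.length
decreasing_by simpa using Nat.lt_succ_of_le (List.length_dropWhile_le _ _)

def gsFin (st : List (List Int) × List Int) : List (List Int) :=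
  if st.2.length > 0 then st.1 ++ [st.2] else st.1

theorem gsAux (l : List Int) : ∀ (sections : List (List Int)) (k : ℕ) (a : Int),
    gsFin (l.foldl gsStep (sections, List.replicate (k+1) a))
    = sections ++ (List.replicate (k+1) a ++ l.takeWhile (· == a)) :: runs (l.dropWhile (· == a)) := by
  induction l with
  | nil =>
    intro sections k a
    simp only [List.foldl_nil, List.takeWhile_nil, List.dropWhile_nil]
    rw [runs]
    simp [gsFin]
  | cons x l ih =>
    intro sections k a
    by_cases hx : x = a
    · subst hx
      have hstep : gsStep (sections, List.replicate (k+1) x) x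
          = (sections, List.replicate (k+1+1) x) := by
        simp [gsStep, List.getLast?_replicate, List.replicate_succ' (n := k+1)]
      simp only [List.foldl_cons, hstep]
      rw [ih sections (k+1) x]
      rw [List.takeWhile_cons_of_pos (by simp), List.dropWhile_cons_of_pos (by simp)]
      simp [List.replicate_succ' (n := k+1)]
    · have hstep : gsStep (sections, List.replicate (k+1) a) x
          = (sections ++ [List.replicate (k+1) a], [x]) := by
        simp [gsStep, List.getLast?_replicate]
        intro h
        exact absurd h.symm hx
      simp only [List.foldl_cons, hstep]
      have h2 := ih (sections ++ [List.replicate (k+1) a]) 0 x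
      rw [show ([x] : List Int) = List.replicate (0+1) x by simp] at hstep ⊢
      rw [h2]
      rw [List.takeWhile_cons_of_neg (by simp [hx]), List.dropWhile_cons_of_neg (by simp [hx])]
      rw [runs]
      simp

theorem getSections_eq_runs (path : List Int) : getSections path = runs path := by
  cases path with
  | nil => simp [getSections, runs]
  | cons a l =>
    have hstep : gsStep ([], []) a = ([], List.replicate (0+1) a) := by simp [gsStep]
    have h := gsAux l [] 0 a
    have hfin : getSections (a :: l) = gsFin ((a :: l).foldl gsStep ([], [])) := by
      simp only [getSections, gsFin]
    rw [hfin, List.foldl_cons, hstep, h, runs]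
    simp

theorem foldl_gfStep_runs (l : List Int) : ∀ (st : Option Int × Option Int × Int),
    (runs l).foldl gfStep st = M l st := by
  induction l using runs.induct with
  | case1 => intro st; simp [runs, M]
  | case2 a l' ih => intro st; rw [runs, M, List.foldl_cons, ih]

theorem gfStep_pos (st : Option Int × Option Int × Int) (s : List Int) :
    (gfStep st s).2.2 = st.2.2 + (s.length : Int) := by
  obtain ⟨b, e, p⟩ := st
  simp only [gfStep]
  split_ifs <;> rfl

theorem M_pos (l : List Int) : ∀ (st : Option Int × Option Int × Int),
    (M l st).2.2 = st.2.2 + (l.length : Int) := by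
  induction l using runs.induct with
  | case1 => intro st; simp [M]
  | case2 a l' ih =>
    intro st
    rw [M, ih, gfStep_pos]
    have hlen : (l'.takeWhile (· == a)).length + (l'.dropWhile (· == a)).length = l'.length := by
      have h := congrArg List.length (List.takeWhile_append_dropWhile (p := (· == a)) (l := l'))
      rw [List.length_append] at h
      exact h
    simp only [List.length_cons]
    push_cast
    omega

theorem bTail (t : List Int) : ∀ (a : Int) (b e : Option Int) (i : Int), (∀ x ∈ t, x = a) →
    t.foldl gfAltStep (b, e, i, some a) = (b, e, i + (t.length : Int), some a) := by
  induction t with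
  | nil => intro a b e i _; simp
  | cons x t ih =>
    intro a b e i h
    have hx : x = a := h x (by simp)
    subst hx
    have hstep : gfAltStep (b, e, i, some x) x = (b, e, i + 1, some x) := by
      simp [gfAltStep]
    rw [List.foldl_cons, hstep, ih x b e (i+1) (fun y hy => h y (by simp [hy]))]
    simp only [List.length_cons]
    push_cast
    ring_nf

theorem step_corr (b e : Option Int) (i : Int) (prev : Option Int) (a : Int) (tw : List Int)
    (h : prev ≠ some a) :
    gfAltStep (b, e, i, prev) a
      = ((gfStep (b, e, i) (a :: tw)).1, (gfStep (b, e, i) (a :: tw)).2.1, i + 1, some a) := by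
  simp only [gfAltStep, gfStep, List.headD_cons]
  rw [if_pos (Or.inr h)]
  split_ifs <;> rfl

theorem bMain : ∀ (n : ℕ) (path : List Int), path.length ≤ n →
    ∀ (b e : Option Int) (i : Int) (prev : Option Int),
    (∀ a l', path = a :: l' → prev ≠ some a) →
    (path.foldl gfAltStep (b, e, i, prev)).1 = (M path (b, e, i)).1 ∧
    (path.foldl gfAltStep (b, e, i, prev)).2.1 = (M path (b, e, i)).2.1 := by
  intro n
  induction n with
  | zero =>
    intro path hlen b e i prev _
    have : path = [] := List.eq_nil_of_length_eq_zero (Nat.le_zero.mp hlen)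
    subst this; simp [M]
  | succ n ih =>
    intro path hlen b e i prev hprev
    cases path with
    | nil => simp [M]
    | cons a l =>
      have hpa : prev ≠ some a := hprev a l rfl
      set tw := l.takeWhile (· == a) with htw
      set rest := l.dropWhile (· == a) with hrest
      have hsplit : tw ++ rest = l := List.takeWhile_append_dropWhile
      have hlen' : rest.length ≤ n := by
        have h1 : rest.length ≤ l.length := List.length_dropWhile_le _ _
        simp only [List.length_cons] at hlen; omega
      have htwmem : ∀ x ∈ tw, x = a := by
        intro x hx
        have := List.mem_takeWhile_imp hx
        simpa using this
      have hresthead : ∀ a' l'', rest = a' :: l'' → (some a : Option Int) ≠ some a' := by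
        intro a' l'' hr
        have h3 := List.head?_dropWhile_not (· == a) l
        rw [← hrest, hr] at h3
        simp at h3
        simp only [Ne, Option.some.injEq]
        exact fun h4 => h3 h4.symm
      have hM : M (a :: l) (b, e, i) = M rest (gfStep (b, e, i) (a :: tw)) := by
        rw [M, ← htw, ← hrest]
      have hfold : ∀ s : Option Int × Option Int × Int × Option Int,
          List.foldl gfAltStep s l = List.foldl gfAltStep (List.foldl gfAltStep s tw) rest := by
        intro s
        conv_lhs => rw [← hsplit]
        rw [List.foldl_append]
      -- unfold one step of B
      rw [List.foldl_cons, step_corr b e i prev a tw hpa, hfold,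
        bTail tw a _ _ (i+1) htwmem, hM]
      have hpos : (gfStep (b, e, i) (a :: tw)).2.2 = i + 1 + (tw.length : Int) := by
        rw [gfStep_pos]
        simp only [List.length_cons]
        push_cast
        ring
      have hg : gfStep (b, e, i) (a :: tw)
          = ((gfStep (b, e, i) (a :: tw)).1, (gfStep (b, e, i) (a :: tw)).2.1, i + 1 + (tw.length : Int)) := by
        rw [← hpos]
      exact hg ▸ ih rest hlen' _ _ _ (some a) hresthead

theorem getForeground_eq (path : List Int) : getForeground path = getForeground_alt path := by
  have h1 := getSections_eq_runs path
  have h2 := foldl_gfStep_runs path ((none : Option Int), (none : Option Int), (0 : Int))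
  have h3 := M_pos path ((none : Option Int), (none : Option Int), (0 : Int))
  have hmain := bMain path.length path le_rfl none none 0 none (by intro a l' _; simp)
  simp only [getForeground, getForeground_alt, h1, h2]
  rcases hm : M path ((none : Option Int), (none : Option Int), (0 : Int)) with ⟨m1, m2, m3⟩
  rcases hq : path.foldl gfAltStep ((none : Option Int), (none : Option Int), (0 : Int), (none : Option Int)) with ⟨q1, q2, q3, q4⟩
  rw [hm, hq] at hmain
  rw [hm] at h3
  simp only at hmain h3
  obtain ⟨hb, he⟩ := hmain
  subst hb; subst he
  cases q2 <;> simp_all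

-- ===== VERDICT (by name: the statement is the Claim_ definition above) =====
theorem getForeground_spec : Claim_equal_getForeground := by
  intro path _
  unfold Spec_getForeground
  exact getForeground_eq path
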